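-- pv_equiv track=rewrite | github.com/marekjh/Project-Euler | problems/problem90.py | all_squares
-- ===== SOURCE A (Python) =====
-- def all_squares(pair):
--     squares = {"01", "04", "09", "16", "25", "36", "49", "64", "81"}
--     c1, c2 = pair
--     for s in squares:
--         s1, s2 = int(s[0]), int(s[1])
--         if not (s1 in c1 and s2 in c2 or s1 in c2 and s2 in c1):
--             return False
--     return True
-- ===== SOURCE B (Python) =====
-- def all_squares(pair):
--     c1, c2 = pair
--     achievable = {(a, b) for a in c1 for b in c2} | {(b, a) for a in c1 for b in c2}
--     required = {(0, 1), (0, 4), (0, 9), (1, 6), (2, 5), (3, 6), (4, 9), (6, 4), (8, 1)}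
--     return required <= achievable
-- ===== Notes on version B (the rewrite author's own statement) =====
-- stated objective: alternative
-- what changed: B builds the set of ordered digit pairs the two dice can show (product of c1 x c2 plus its swap) once and answers with a single subset test against the fixed set of square digit pairs, instead of A's loop over the nine square strings with four membership probes each; the square strings become int pairs.
import Mathlib
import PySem

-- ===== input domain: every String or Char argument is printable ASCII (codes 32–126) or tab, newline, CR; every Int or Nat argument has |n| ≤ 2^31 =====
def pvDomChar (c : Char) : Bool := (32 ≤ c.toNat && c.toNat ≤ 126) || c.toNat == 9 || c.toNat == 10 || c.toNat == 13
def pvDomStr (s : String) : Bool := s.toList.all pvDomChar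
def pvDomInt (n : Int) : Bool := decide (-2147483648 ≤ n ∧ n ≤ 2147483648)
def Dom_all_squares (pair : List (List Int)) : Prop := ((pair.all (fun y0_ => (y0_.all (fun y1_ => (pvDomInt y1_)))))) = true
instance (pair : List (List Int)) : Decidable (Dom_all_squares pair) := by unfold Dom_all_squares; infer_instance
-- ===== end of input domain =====

-- B is an alternative, not faster: it indexes the achievable digit pairs once and does one subset test.
-- ===== PORT A =====
-- the Python set literal of square strings, in source order (the loop's result is order-independent)
def pySquaresA : List String := ["01", "04", "09", "16", "25", "36", "49", "64", "81"]

-- int(s[i]) for a known-in-range index: IndexError/ValueError cannot occur on the literals above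
def pyDigitA (s : String) (i : Int) : Int :=
  ((PySem.Str.pyGet? s i).bind (fun c => PySem.Int.ofChars? [c])).getD 0

def all_squares (pair : List (List Int)) : Bool :=
  match pair with
  | [c1, c2] =>
      pySquaresA.all (fun s =>
        let s1 := pyDigitA s 0
        let s2 := pyDigitA s 1
        (c1.contains s1 && c2.contains s2) || (c2.contains s1 && c1.contains s2))
  | _ => false    -- 'c1, c2 = pair' raises ValueError; excluded by Pre_

-- ===== PORT B =====
def requiredPairsB : List (Int × Int) := [(0,1), (0,4), (0,9), (1,6), (2,5), (3,6), (4,9), (6,4), (8,1)]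

def all_squares_alt (pair : List (List Int)) : Bool :=
  -- 'c1, c2 = pair' raises ValueError unless len(pair) == 2; excluded by Pre_
  if pair.length = 2 then
    let c1 := pair.headD []
    let c2 := pair.tail.headD []
    let achievable := PySem.Set.union
      (PySem.Set.ofList (c1.flatMap (fun a => c2.map (fun b => (a, b)))))
      (c1.flatMap (fun a => c2.map (fun b => (b, a))))
    PySem.Set.issubset (PySem.Set.ofList requiredPairsB) achievable
  else false

-- ===== PRECONDITION & SPEC =====
-- A (and B) raise ValueError unless the unpacking 'c1, c2 = pair' gets exactly two dice.
def Pre_all_squares (pair : List (List Int)) : Prop := pair.length = 2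
instance (pair : List (List Int)) : Decidable (Pre_all_squares pair) := by unfold Pre_all_squares; infer_instance
def pvWitness_all_squares : List (List Int) := [[0, 1, 2, 3, 4, 5], [6, 7, 8, 9, 0, 1]]

def Spec_all_squares (pair : List (List Int)) (out : Bool) : Prop := out = all_squares_alt pair
instance (pair : List (List Int)) (out : Bool) : Decidable (Spec_all_squares pair out) := by unfold Spec_all_squares; infer_instance

-- ===== CLAIM (what is proved, stated in full; the proofs are below) =====
def Claim_equal_all_squares : Prop := ∀ (pair : List (List Int)), Dom_all_squares pair → Pre_all_squares pair → Spec_all_squares pair (all_squares pair)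

-- ===== LEMMAS AND PROOFS =====
lemma mem_achievable (c1 c2 : List Int) (p : Int × Int) :
    p ∈ PySem.Set.union
        (PySem.Set.ofList (c1.flatMap (fun a => c2.map (fun b => (a, b)))))
        (c1.flatMap (fun a => c2.map (fun b => (b, a)))) ↔
      (p.1 ∈ c1 ∧ p.2 ∈ c2) ∨ (p.1 ∈ c2 ∧ p.2 ∈ c1) := by
  obtain ⟨x, y⟩ := p
  simp only [PySem.Set.mem_union, PySem.Set.mem_ofList, List.mem_flatMap, List.mem_map,
    Prod.mk.injEq]
  aesop

lemma alt_eq (c1 c2 : List Int) :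
    all_squares_alt [c1, c2] = true ↔
      ∀ p ∈ requiredPairsB, (p.1 ∈ c1 ∧ p.2 ∈ c2) ∨ (p.1 ∈ c2 ∧ p.2 ∈ c1) := by
  show PySem.Set.issubset (PySem.Set.ofList requiredPairsB) _ = true ↔ _
  simp only [PySem.Set.issubset_iff, PySem.Set.mem_ofList]
  constructor
  · intro h p hp
    exact (mem_achievable c1 c2 p).1 (h p hp)
  · intro h p hp
    exact (mem_achievable c1 c2 p).2 (h p hp)

lemma a_eq (c1 c2 : List Int) :
    all_squares [c1, c2] = true ↔
      ∀ p ∈ requiredPairsB, (p.1 ∈ c1 ∧ p.2 ∈ c2) ∨ (p.1 ∈ c2 ∧ p.2 ∈ c1) := by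
  simp only [all_squares, pySquaresA, requiredPairsB, List.all_cons, List.all_nil, List.mem_cons,
    List.not_mem_nil, Bool.and_eq_true, Bool.or_eq_true, List.contains_eq_mem, decide_eq_true_eq]
  constructor
  · rintro ⟨h1, h2, h3, h4, h5, h6, h7, h8, h9, -⟩ p hp
    rcases hp with h | h | h | h | h | h | h | h | h | h
    all_goals first
      | (subst h; first
          | simpa [pyDigitA, PySem.Str.pyGet?, PySem.Int.ofChars?] using h1
          | simpa [pyDigitA, PySem.Str.pyGet?, PySem.Int.ofChars?] using h2
          | simpa [pyDigitA, PySem.Str.pyGet?, PySem.Int.ofChars?] using h3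
          | simpa [pyDigitA, PySem.Str.pyGet?, PySem.Int.ofChars?] using h4
          | simpa [pyDigitA, PySem.Str.pyGet?, PySem.Int.ofChars?] using h5
          | simpa [pyDigitA, PySem.Str.pyGet?, PySem.Int.ofChars?] using h6
          | simpa [pyDigitA, PySem.Str.pyGet?, PySem.Int.ofChars?] using h7
          | simpa [pyDigitA, PySem.Str.pyGet?, PySem.Int.ofChars?] using h8
          | simpa [pyDigitA, PySem.Str.pyGet?, PySem.Int.ofChars?] using h9)
      | exact absurd h (by simp)
  · intro h
    refine ⟨?_, ?_, ?_, ?_, ?_, ?_, ?_, ?_, ?_, trivial⟩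
    · simpa [pyDigitA, PySem.Str.pyGet?, PySem.Int.ofChars?] using h (0, 1) (by simp)
    · simpa [pyDigitA, PySem.Str.pyGet?, PySem.Int.ofChars?] using h (0, 4) (by simp)
    · simpa [pyDigitA, PySem.Str.pyGet?, PySem.Int.ofChars?] using h (0, 9) (by simp)
    · simpa [pyDigitA, PySem.Str.pyGet?, PySem.Int.ofChars?] using h (1, 6) (by simp)
    · simpa [pyDigitA, PySem.Str.pyGet?, PySem.Int.ofChars?] using h (2, 5) (by simp)
    · simpa [pyDigitA, PySem.Str.pyGet?, PySem.Int.ofChars?] using h (3, 6) (by simp)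
    · simpa [pyDigitA, PySem.Str.pyGet?, PySem.Int.ofChars?] using h (4, 9) (by simp)
    · simpa [pyDigitA, PySem.Str.pyGet?, PySem.Int.ofChars?] using h (6, 4) (by simp)
    · simpa [pyDigitA, PySem.Str.pyGet?, PySem.Int.ofChars?] using h (8, 1) (by simp)

-- ===== VERDICT (by name: the statement is the Claim_ definition above) =====
theorem all_squares_spec : Claim_equal_all_squares := by
  intro pair _ hpre
  match pair, hpre with
  | [c1, c2], _ =>
    unfold Spec_all_squares
    rcases h : all_squares_alt [c1, c2] with _ | _
    · rcases ha : all_squares [c1, c2] with _ | _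
      · rfl
      · exact absurd ((alt_eq c1 c2).2 ((a_eq c1 c2).1 ha)) (by simp [h])
    · exact (a_eq c1 c2).2 ((alt_eq c1 c2).1 h)
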